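-- pv_equiv track=rewrite | github.com/Build-Up-1214/Algorithm-Study | hyeongiii/PRG/연습문제/Lv1_숫자짝꿍.py | solution
-- ===== SOURCE A (Python) =====
-- def solution(X, Y):
--     answer = ""
--
--     # sort()를 사용하지 않고도 정렬하는 방법!!!
--     for i in range(9, -1, -1):
--         answer += str(i) * (min(X.count(str(i)), Y.count(str(i))))
--
--     if len(answer) == 0:
--         return "-1"
--     elif len(answer) == answer.count("0"):
--         return "0"
--     else:
--         return answer
-- ===== SOURCE B (Python) =====
-- def solution(X, Y):
--     # sort each string's digits descending, then a two-pointer merge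
--     # emits each common digit min-multiplicity many times, already in order
--     xs = sorted((c for c in X if c.isdigit()), reverse=True)
--     ys = sorted((c for c in Y if c.isdigit()), reverse=True)
--     out = []
--     i = j = 0
--     while i < len(xs) and j < len(ys):
--         if xs[i] == ys[j]:
--             out.append(xs[i])
--             i += 1
--             j += 1
--         elif xs[i] > ys[j]:
--             i += 1
--         else:
--             j += 1
--     if not out:
--         return "-1"
--     if out[0] == "0":
--         return "0"
--     return "".join(out)
-- ===== Notes on version B (the rewrite author's own statement) =====
-- stated objective: alternative
-- what changed: Replaces the fixed 9..0 counting loop (repeated .count scans per digit) by sorting each string's digits descending and intersecting the two sorted sequences with a two-pointer merge, which emits the common multiset already in descending order; the all-zero test becomes a check of the first (largest) emitted digit.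
import Mathlib
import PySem

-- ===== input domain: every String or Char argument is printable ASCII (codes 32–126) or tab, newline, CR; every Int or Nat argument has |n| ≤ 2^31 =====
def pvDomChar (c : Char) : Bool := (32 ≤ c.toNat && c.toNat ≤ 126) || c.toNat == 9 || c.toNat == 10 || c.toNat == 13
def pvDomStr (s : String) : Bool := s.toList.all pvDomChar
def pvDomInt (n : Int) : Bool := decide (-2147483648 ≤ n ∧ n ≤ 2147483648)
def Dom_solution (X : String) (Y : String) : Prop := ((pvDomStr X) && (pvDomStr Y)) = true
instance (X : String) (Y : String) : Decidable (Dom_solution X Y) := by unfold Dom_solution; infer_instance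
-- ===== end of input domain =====

-- B replaces A's fixed 9..0 counting loop by sorting each string's digits descending and
-- intersecting the two sorted sequences with a two-pointer merge (alternative; same result).


-- ===== PORT A =====
def solution (X : String) (Y : String) : String :=
  let answer : List Char :=
    (PySem.List.pyRange 9 (-1) (-1)).foldl
      (fun acc i =>
        acc ++ PySem.List.pyRepeat (PySem.Int.toChars i)
          ((min (PySem.Str.count X (PySem.Int.toStr i))
                (PySem.Str.count Y (PySem.Int.toStr i)) : Nat) : Int))
      []
  if answer.length = 0 then "-1"
  else if answer.length = PySem.Chars.count answer ['0'] then "0"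
  else String.mk answer

-- ===== PORT B =====
-- B's while loop over indices i, j, transcribed as recursion on the unread suffixes
-- (i, j advancing = consuming a head); the loop stops when either suffix is empty
def pvMerge : List Char → List Char → List Char
  | x :: xs, y :: ys =>
    if x = y then x :: pvMerge xs ys
    else if y < x then pvMerge xs (y :: ys)
    else pvMerge (x :: xs) ys
  | _, _ => []

def solution_alt (X : String) (Y : String) : String :=
  let xs := PySem.List.sorted (X.toList.filter PySem.Chars.isdigit) (fun c => c) true
  let ys := PySem.List.sorted (Y.toList.filter PySem.Chars.isdigit) (fun c => c) true
  let out := pvMerge xs ys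
  if out = [] then "-1"
  else if out.head? = some '0' then "0"
  else String.mk out

-- ===== PRECONDITION & SPEC =====
def Spec_solution (X : String) (Y : String) (out : String) : Prop := out = solution_alt X Y
instance (X : String) (Y : String) (out : String) : Decidable (Spec_solution X Y out) := by unfold Spec_solution; infer_instance

-- ===== CLAIM (what is proved, stated in full; the proofs are below) =====
def Claim_equal_solution : Prop := ∀ (X : String) (Y : String), Dom_solution X Y → Spec_solution X Y (solution X Y)

-- ===== LEMMAS AND PROOFS =====

-- the ten digit characters, descending (the order A emits)
def pvDigits : List Char := ['9','8','7','6','5','4','3','2','1','0']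

-- Chars.count.go with a single-character needle counts occurrences of that character
theorem pv_count_single_go (c : Char) : ∀ (fuel : Nat) (l : List Char) (acc : Nat),
    l.length ≤ fuel → PySem.Chars.count.go [c] fuel l acc = acc + l.count c := by
  intro fuel
  induction fuel with
  | zero =>
    intro l acc h
    cases l with
    | nil => simp [PySem.Chars.count.go]
    | cons hd t => simp at h
  | succ n ih =>
    intro l acc h
    cases l with
    | nil => simp [PySem.Chars.count.go]
    | cons hd t =>
      rw [PySem.Chars.count.go]
      by_cases hc : c = hd
      · subst hc
        simp only [List.isPrefixOf, Bool.and_eq_true, beq_self_eq_true,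
          and_self, if_pos, List.length_singleton, List.drop_one, List.tail_cons]
        rw [ih t (acc + 1) (by simpa using Nat.lt_succ_iff.mp (by simpa using h))]
        simp [List.count_cons]
        omega
      · have hpre : [c].isPrefixOf (hd :: t) = false := by
          simp [List.isPrefixOf]
          exact fun h' => hc h'
        rw [hpre]
        simp only [Bool.false_eq_true, ite_false]
        rw [ih t acc (by simpa using Nat.lt_succ_iff.mp (by simpa using h))]
        simp only [List.count_cons, beq_iff_eq, if_neg (fun h' : hd = c => hc h'.symm), add_zero]

-- Python's str.count with a single-character needle is the character count
theorem pv_count_single (cs : List Char) (c : Char) :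
    PySem.Chars.count cs [c] = cs.count c := by
  simp only [PySem.Chars.count, List.isEmpty_cons, Bool.false_eq_true, ite_false]
  simpa using pv_count_single_go c cs.length cs 0 le_rfl

-- A's loop body, named: the answer list A builds
def pvAcat (X Y : String) : List Char :=
  pvDigits.flatMap (fun d => List.replicate (min (X.toList.count d) (Y.toList.count d)) d)

theorem pv_A_answer (X Y : String) :
    (PySem.List.pyRange 9 (-1) (-1)).foldl
      (fun acc i =>
        acc ++ PySem.List.pyRepeat (PySem.Int.toChars i)
          ((min (PySem.Str.count X (PySem.Int.toStr i))
                (PySem.Str.count Y (PySem.Int.toStr i)) : Nat) : Int))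
      [] = pvAcat X Y := by
  have hr : PySem.List.pyRange 9 (-1) (-1) = [9, 8, 7, 6, 5, 4, 3, 2, 1, 0] := by decide
  rw [hr, PySem.List.foldl_append_eq_flatMap]
  have h9 : PySem.Int.toChars 9 = ['9'] := by decide
  have h8 : PySem.Int.toChars 8 = ['8'] := by decide
  have h7 : PySem.Int.toChars 7 = ['7'] := by decide
  have h6 : PySem.Int.toChars 6 = ['6'] := by decide
  have h5 : PySem.Int.toChars 5 = ['5'] := by decide
  have h4 : PySem.Int.toChars 4 = ['4'] := by decide
  have h3 : PySem.Int.toChars 3 = ['3'] := by decide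
  have h2 : PySem.Int.toChars 2 = ['2'] := by decide
  have h1 : PySem.Int.toChars 1 = ['1'] := by decide
  have h0 : PySem.Int.toChars 0 = ['0'] := by decide
  simp only [List.nil_append, pvAcat, pvDigits, List.flatMap_cons, List.flatMap_nil,
    List.append_nil, PySem.Str.count_eq, PySem.Int.toList_toStr,
    h9, h8, h7, h6, h5, h4, h3, h2, h1, h0,
    PySem.List.pyRepeat_singleton, Int.toNat_natCast, pv_count_single]

-- members of the merge come from both inputs
theorem pv_merge_mem (xs ys : List Char) (c : Char) (h : c ∈ pvMerge xs ys) :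
    c ∈ xs ∧ c ∈ ys := by
  induction xs, ys using pvMerge.induct with
  | case1 xs y ys ih =>
    rw [pvMerge, if_pos rfl] at h
    rcases List.mem_cons.mp h with rfl | h'
    · exact ⟨List.mem_cons_self, List.mem_cons_self⟩
    · exact ⟨List.mem_cons_of_mem _ (ih h').1, List.mem_cons_of_mem _ (ih h').2⟩
  | case2 x xs y ys hne hlt ih =>
    rw [pvMerge, if_neg hne, if_pos hlt] at h
    exact ⟨List.mem_cons_of_mem _ (ih h).1, (ih h).2⟩
  | case3 x xs y ys hne hlt ih =>
    rw [pvMerge, if_neg hne, if_neg hlt] at h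
    exact ⟨(ih h).1, List.mem_cons_of_mem _ (ih h).2⟩
  | case4 l1 l2 hno =>
    rcases l1 with _ | ⟨x, xs⟩
    · simp [pvMerge.eq_def] at h
    · rcases l2 with _ | ⟨y, ys⟩
      · simp [pvMerge.eq_def] at h
      · exact (hno _ _ _ _ rfl rfl).elim

-- the merge of two descending lists counts each char min-many times
theorem pv_merge_count (xs ys : List Char) (c : Char) :
    xs.Pairwise (fun a b => b ≤ a) → ys.Pairwise (fun a b => b ≤ a) →
    (pvMerge xs ys).count c = min (xs.count c) (ys.count c) := by
  induction xs, ys using pvMerge.induct with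
  | case1 xs y ys ih =>
    intro hx hy
    rw [pvMerge, if_pos rfl]
    simp only [List.count_cons,
      ih (List.pairwise_cons.mp hx).2 (List.pairwise_cons.mp hy).2]
    split_ifs <;> omega
  | case2 x xs y ys hne hlt ih =>
    intro hx hy
    rw [pvMerge, if_neg hne, if_pos hlt, ih (List.pairwise_cons.mp hx).2 hy]
    by_cases hc : c = x
    · have h0 : c ∉ y :: ys := by
        intro hmem
        have hle : c ≤ y := by
          rcases List.mem_cons.mp hmem with h | h
          · exact le_of_eq h
          · exact (List.pairwise_cons.mp hy).1 _ h
        rw [hc] at hle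
        exact absurd hlt (not_lt.mpr hle)
      rw [List.count_eq_zero.mpr h0]
      simp only [List.count_cons]
      split_ifs <;> omega
    · rw [List.count_cons_of_ne (Ne.symm hc)]
  | case3 x xs y ys hne hlt ih =>
    intro hx hy
    rw [pvMerge, if_neg hne, if_neg hlt, ih hx (List.pairwise_cons.mp hy).2]
    have hxy : x < y := lt_of_le_of_ne (not_lt.mp hlt) hne
    by_cases hc : c = y
    · have h0 : c ∉ x :: xs := by
        intro hmem
        have hle : c ≤ x := by
          rcases List.mem_cons.mp hmem with h | h
          · exact le_of_eq h
          · exact (List.pairwise_cons.mp hx).1 _ h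
        rw [hc] at hle
        exact absurd hxy (not_lt.mpr hle)
      rw [List.count_eq_zero.mpr h0]
      simp only [List.count_cons]
      split_ifs <;> omega
    · rw [List.count_cons_of_ne (Ne.symm hc)]
  | case4 l1 l2 hno =>
    intro hx hy
    rcases l1 with _ | ⟨x, xs⟩
    · simp [pvMerge.eq_def]
    · rcases l2 with _ | ⟨y, ys⟩
      · simp [pvMerge.eq_def]
      · exact (hno _ _ _ _ rfl rfl).elim

-- the merge of two descending lists is descending
theorem pv_merge_pairwise (xs ys : List Char) :
    xs.Pairwise (fun a b => b ≤ a) →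
    (pvMerge xs ys).Pairwise (fun a b => b ≤ a) := by
  induction xs, ys using pvMerge.induct with
  | case1 xs y ys ih =>
    intro hx
    rw [pvMerge, if_pos rfl]
    refine List.pairwise_cons.mpr ⟨?_, ih (List.pairwise_cons.mp hx).2⟩
    intro b hb
    exact (List.pairwise_cons.mp hx).1 _ (pv_merge_mem _ _ _ hb).1
  | case2 x xs y ys hne hlt ih =>
    intro hx
    rw [pvMerge, if_neg hne, if_pos hlt]
    exact ih (List.pairwise_cons.mp hx).2
  | case3 x xs y ys hne hlt ih =>
    intro hx
    rw [pvMerge, if_neg hne, if_neg hlt]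
    exact ih hx
  | case4 l1 l2 hno =>
    intro hx
    rcases l1 with _ | ⟨x, xs⟩
    · simp [pvMerge.eq_def]
    · rcases l2 with _ | ⟨y, ys⟩
      · simp [pvMerge.eq_def]
      · exact (hno _ _ _ _ rfl rfl).elim

theorem pv_count_flatMap_replicate (S : List Char) (m : Char → Nat) (c : Char) (hnd : S.Nodup) :
    (S.flatMap (fun k => List.replicate (m k) k)).count c = if c ∈ S then m c else 0 := by
  induction S with
  | nil => simp
  | cons h t ih =>
    rcases List.nodup_cons.mp hnd with ⟨hmem, hnd'⟩
    simp only [List.flatMap_cons, List.count_append, List.count_replicate, ih hnd', List.mem_cons]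
    by_cases hc : c = h
    · subst hc
      simp [hmem]
    · simp [hc, Ne.symm hc]

theorem pv_isdigit_iff (c : Char) : PySem.Chars.isdigit c = true ↔ c ∈ pvDigits := by
  simp only [pvDigits, PySem.Chars.isdigit, Bool.and_eq_true, decide_eq_true_eq, List.mem_cons,
    List.not_mem_nil, or_false]
  constructor
  · rintro ⟨hlo, hhi⟩
    have h1' : 48 ≤ c.toNat := hlo
    have h2' : c.toNat ≤ 57 := hhi
    have hh : c.toNat = 48 ∨ c.toNat = 49 ∨ c.toNat = 50 ∨ c.toNat = 51 ∨ c.toNat = 52 ∨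
        c.toNat = 53 ∨ c.toNat = 54 ∨ c.toNat = 55 ∨ c.toNat = 56 ∨ c.toNat = 57 := by omega
    have hc : Char.ofNat c.toNat = c := Char.ofNat_toNat c
    rcases hh with h|h|h|h|h|h|h|h|h|h <;> rw [h] at hc <;> simp [← hc]
  · rintro (h|h|h|h|h|h|h|h|h|h) <;> subst h <;> exact ⟨by decide, by decide⟩

-- B's merge output is a permutation of A's answer
theorem pv_perm (X Y : String) :
    (pvMerge (PySem.List.sorted (X.toList.filter PySem.Chars.isdigit) (fun c => c) true)
             (PySem.List.sorted (Y.toList.filter PySem.Chars.isdigit) (fun c => c) true)).Perm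
      (pvAcat X Y) := by
  set xs := PySem.List.sorted (X.toList.filter PySem.Chars.isdigit) (fun c => c) true with hxs
  set ys := PySem.List.sorted (Y.toList.filter PySem.Chars.isdigit) (fun c => c) true with hys
  have hxp : xs.Pairwise (fun a b : Char => b ≤ a) := by
    simpa using PySem.List.sorted_pairwise_rev (X.toList.filter PySem.Chars.isdigit) (fun c => c)
  have hyp : ys.Pairwise (fun a b : Char => b ≤ a) := by
    simpa using PySem.List.sorted_pairwise_rev (Y.toList.filter PySem.Chars.isdigit) (fun c => c)
  rw [List.perm_iff_count]
  intro c
  rw [pv_merge_count xs ys c hxp hyp]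
  have hcx : xs.count c = (X.toList.filter PySem.Chars.isdigit).count c :=
    (PySem.List.sorted_perm _ _ _).count_eq c
  have hcy : ys.count c = (Y.toList.filter PySem.Chars.isdigit).count c :=
    (PySem.List.sorted_perm _ _ _).count_eq c
  unfold pvAcat
  rw [pv_count_flatMap_replicate _ _ _ (by decide), hcx, hcy]
  by_cases hd : c ∈ pvDigits
  · have hdig : PySem.Chars.isdigit c = true := (pv_isdigit_iff c).mpr hd
    rw [if_pos hd, List.count_filter hdig, List.count_filter hdig]
  · have hdig : ¬ PySem.Chars.isdigit c = true := fun h => hd ((pv_isdigit_iff c).mp h)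
    rw [if_neg hd]
    have hz : ∀ (s : List Char), (s.filter PySem.Chars.isdigit).count c = 0 := by
      intro s
      rw [List.count_eq_zero]
      intro hmem
      exact hdig (List.mem_filter.mp hmem).2
    rw [hz, hz]
    simp

theorem pv_pairwise_flatMap (ds : List Char) (m : Char → Nat)
    (h : ds.Pairwise (fun a b => b < a)) :
    (ds.flatMap (fun d => List.replicate (m d) d)).Pairwise (fun a b : Char => b ≤ a) := by
  induction h with
  | nil => simp
  | cons hd ht ih =>
    simp only [List.flatMap_cons]
    rw [List.pairwise_append]
    refine ⟨List.pairwise_replicate.mpr (Or.inr le_rfl), ih, ?_⟩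
    intro a ha b hb
    rcases List.eq_of_mem_replicate ha with rfl
    rcases List.mem_flatMap.mp hb with ⟨e, he, hbe⟩
    have hbe' := List.eq_of_mem_replicate hbe
    subst hbe'
    exact le_of_lt (hd _ he)

theorem pv_pairwise_Acat (X Y : String) :
    (pvAcat X Y).Pairwise (fun a b => b ≤ a) :=
  pv_pairwise_flatMap pvDigits _ (by decide)

-- B's out list equals A's answer list
theorem pv_merge_eq (X Y : String) :
    pvMerge (PySem.List.sorted (X.toList.filter PySem.Chars.isdigit) (fun c => c) true)
            (PySem.List.sorted (Y.toList.filter PySem.Chars.isdigit) (fun c => c) true)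
      = pvAcat X Y := by
  have hxp : (PySem.List.sorted (X.toList.filter PySem.Chars.isdigit) (fun c => c) true).Pairwise
      (fun a b : Char => b ≤ a) := by
    simpa using PySem.List.sorted_pairwise_rev (X.toList.filter PySem.Chars.isdigit) (fun c => c)
  exact List.Perm.eq_of_pairwise
    (fun a b _ _ hab hba => le_antisymm hba hab)
    (pv_merge_pairwise _ _ hxp) (pv_pairwise_Acat X Y) (pv_perm X Y)

-- every element of A's answer is a digit, hence ≥ '0'
theorem pv_Acat_ge_zero (X Y : String) (b : Char) (hb : b ∈ pvAcat X Y) : '0' ≤ b := by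
  rcases List.mem_flatMap.mp hb with ⟨d, hd, hbd⟩
  rcases List.eq_of_mem_replicate hbd with rfl
  simp only [pvDigits, List.mem_cons, List.not_mem_nil, or_false] at hd
  rcases hd with rfl|rfl|rfl|rfl|rfl|rfl|rfl|rfl|rfl|rfl <;> decide

-- ===== VERDICT (by name: the statement is the Claim_ definition above) =====
theorem solution_spec : Claim_equal_solution := by
  intro X Y _
  unfold Spec_solution solution solution_alt
  simp only []
  rw [pv_A_answer X Y, pv_merge_eq X Y]
  set L := pvAcat X Y with hL
  by_cases h0 : L.length = 0
  · simp [List.length_eq_zero_iff.mp h0]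
  · have hne : L ≠ [] := fun h => h0 (by simp [h])
    simp only [if_neg h0, if_neg hne]
    obtain ⟨hd, tl, hcons⟩ := List.exists_cons_of_ne_nil hne
    have hiff : (L.length = PySem.Chars.count L ['0']) ↔ L.head? = some '0' := by
      rw [pv_count_single]
      constructor
      · intro h
        have hall : ∀ b ∈ L, '0' = b := List.count_eq_length.mp h.symm
        rw [hcons]
        simp [← hall hd (hcons ▸ List.mem_cons_self)]
      · intro h
        have hpw : (hd :: tl).Pairwise (fun a b : Char => b ≤ a) := by
          rw [← hcons, hL]
          exact pv_pairwise_Acat X Y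
        have hhd : hd = '0' := by rw [hcons] at h; simpa using h
        refine (List.count_eq_length.mpr ?_).symm
        intro b hb
        have hge : '0' ≤ b := pv_Acat_ge_zero X Y b (by rw [← hL]; exact hb)
        have hle : b ≤ hd := by
          rw [hcons] at hb
          rcases List.mem_cons.mp hb with h' | h'
          · exact le_of_eq h'
          · exact (List.pairwise_cons.mp hpw).1 _ h'
        rw [hhd] at hle
        exact le_antisymm hge hle
    by_cases hz : L.length = PySem.Chars.count L ['0']
    · simp [hz, hiff.mp hz]
    · have : ¬ L.head? = some '0' := fun h => hz (hiff.mpr h)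
      simp [hz, this]
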